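-- pv_equiv track=rewrite | github.com/91Lokki/tw-quant-system | src/tw_quant/execution/paper.py | _merge_rows_by_date
-- ===== SOURCE A (Python) =====
-- def _merge_rows_by_date(
--     existing_rows: list[dict[str, str]],
--     new_rows: list[dict[str, str]],
-- ) -> list[dict[str, str]]:
--     by_date = {row["date"]: row for row in existing_rows}
--     for row in new_rows:
--         by_date[row["date"]] = row
--     return [by_date[key] for key in sorted(by_date)]
-- ===== SOURCE B (Python) =====
-- def _merge_rows_by_date(
--     existing_rows: list[dict[str, str]],
--     new_rows: list[dict[str, str]],
-- ) -> list[dict[str, str]]: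
--     rows = existing_rows + new_rows
--     dates = sorted({row["date"] for row in rows})
--     result = []
--     for d in dates:
--         for row in reversed(rows):
--             if row["date"] == d:
--                 result.append(row)
--                 break
--     return result
-- ===== Notes on version B (the rewrite author's own statement) =====
-- stated objective: alternative
-- what changed: Replaces the date-keyed dict with override semantics by a sorted set of distinct dates plus, per date, a reverse linear scan of existing+new for the last row with that date.
import Mathlib
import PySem

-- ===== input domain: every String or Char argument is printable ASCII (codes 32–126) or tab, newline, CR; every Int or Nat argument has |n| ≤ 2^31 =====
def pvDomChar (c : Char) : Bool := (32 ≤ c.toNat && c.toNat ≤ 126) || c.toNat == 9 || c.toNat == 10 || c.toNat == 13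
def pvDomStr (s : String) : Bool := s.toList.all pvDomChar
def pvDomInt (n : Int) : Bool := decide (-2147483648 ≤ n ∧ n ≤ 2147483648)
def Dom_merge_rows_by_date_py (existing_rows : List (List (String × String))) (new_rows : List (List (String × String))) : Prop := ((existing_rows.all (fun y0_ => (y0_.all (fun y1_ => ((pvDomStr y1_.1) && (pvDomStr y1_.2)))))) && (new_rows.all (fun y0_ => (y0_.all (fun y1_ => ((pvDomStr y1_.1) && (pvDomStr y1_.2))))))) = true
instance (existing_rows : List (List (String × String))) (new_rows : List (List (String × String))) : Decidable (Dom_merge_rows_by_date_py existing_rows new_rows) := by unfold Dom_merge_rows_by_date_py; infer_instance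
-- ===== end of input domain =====

-- B replaces A's date-keyed dict (new rows overriding existing) by a sorted set of distinct
-- dates plus a reverse scan of existing+new per date; alternative structure, no speed claim.

-- row["date"] for a row dict; total form of the raising lookup (Pre_ guarantees the key exists)
def pvRowDate (r : List (String × String)) : String :=
  ((PySem.Dict.mk r).get? "date").getD ""

-- ===== PORT A =====
def merge_rows_by_date_py (existing_rows : List (List (String × String))) (new_rows : List (List (String × String))) : List (List (String × String)) :=
  -- by_date = {row["date"]: row for row in existing_rows}
  let by_date0 := existing_rows.foldl (fun d r => d.insert (pvRowDate r) r) PySem.Dict.empty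
  -- for row in new_rows: by_date[row["date"]] = row
  let by_date := new_rows.foldl (fun d r => d.insert (pvRowDate r) r) by_date0
  -- [by_date[key] for key in sorted(by_date)]
  (PySem.List.sorted by_date.keys (fun x => x) false).map (fun kk => (by_date.get? kk).getD [])

-- ===== PORT B =====
def merge_rows_by_date_py_alt (existing_rows : List (List (String × String))) (new_rows : List (List (String × String))) : List (List (String × String)) :=
  -- rows = existing_rows + new_rows
  let rows := existing_rows ++ new_rows
  -- dates = sorted({row["date"] for row in rows})
  let dates := PySem.List.sorted (PySem.Set.ofList (rows.map pvRowDate)) (fun x => x) false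
  -- for d in dates: for row in reversed(rows): if row["date"] == d: append; break
  dates.foldl (fun acc d =>
    match rows.reverse.find? (fun r => pvRowDate r == d) with
    | some r => acc ++ [r]
    | none => acc) []

-- ===== PRECONDITION & SPEC =====
-- A (and B) raise KeyError on any row without a "date" key; exactly those inputs are excluded.
def Pre_merge_rows_by_date_py (existing_rows : List (List (String × String))) (new_rows : List (List (String × String))) : Prop :=
  ((existing_rows ++ new_rows).all (fun r => (PySem.Dict.mk r).contains "date")) = true
instance (existing_rows : List (List (String × String))) (new_rows : List (List (String × String))) : Decidable (Pre_merge_rows_by_date_py existing_rows new_rows) := by unfold Pre_merge_rows_by_date_py; infer_instance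

def pvWitness_merge_rows_by_date_py : (List (List (String × String))) × (List (List (String × String))) :=
  ([[("date", "2024-01-02"), ("px", "1")]], [[("date", "2024-01-01")]])

def Spec_merge_rows_by_date_py (existing_rows : List (List (String × String))) (new_rows : List (List (String × String))) (out : List (List (String × String))) : Prop := out = merge_rows_by_date_py_alt existing_rows new_rows
instance (existing_rows : List (List (String × String))) (new_rows : List (List (String × String))) (out : List (List (String × String))) : Decidable (Spec_merge_rows_by_date_py existing_rows new_rows out) := by unfold Spec_merge_rows_by_date_py; infer_instance

-- ===== CLAIM (what is proved, stated in full; the proofs are below) =====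
def Claim_equal_merge_rows_by_date_py : Prop := ∀ (existing_rows : List (List (String × String))) (new_rows : List (List (String × String))), Dom_merge_rows_by_date_py existing_rows new_rows → Pre_merge_rows_by_date_py existing_rows new_rows → Spec_merge_rows_by_date_py existing_rows new_rows (merge_rows_by_date_py existing_rows new_rows)

-- ===== LEMMAS AND PROOFS =====

-- get? of the dict built by a fold of inserts = last matching row (reverse find), else the start dict
theorem pv_get?_foldl_insert (l : List (List (String × String))) (d : PySem.Dict String (List (String × String))) (x : String) :
    (l.foldl (fun d r => d.insert (pvRowDate r) r) d).get? x
      = (l.reverse.find? (fun r => pvRowDate r == x)).or (d.get? x) := by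
  induction l generalizing d with
  | nil => simp
  | cons r t ih =>
    simp only [List.foldl_cons, List.reverse_cons, List.find?_append, ih]
    cases h : t.reverse.find? (fun r => pvRowDate r == x) with
    | some r' => simp [Option.or]
    | none =>
      simp only [Option.or, List.find?]
      by_cases hx : pvRowDate r = x
      · subst hx; simp [PySem.Dict.get?_insert_self]
      · have : (pvRowDate r == x) = false := by simpa using hx
        simp [this, PySem.Dict.get?_insert_of_ne _ _ (Ne.symm hx)]

-- the foldl with break-append equals a map when every date is found
theorem pv_foldl_find_eq_map (F : String → Option (List (String × String))) (ds : List String) (acc : List (List (String × String)))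
    (h : ∀ x ∈ ds, (F x).isSome) :
    ds.foldl (fun a x => match F x with | some r => a ++ [r] | none => a) acc
      = acc ++ ds.map (fun x => (F x).getD []) := by
  induction ds generalizing acc with
  | nil => simp
  | cons x t ih =>
    obtain ⟨r, hr⟩ := Option.isSome_iff_exists.mp (h x (by simp))
    simp only [List.foldl_cons, List.map_cons, hr]
    rw [ih _ (fun y hy => h y (by simp [hy]))]
    simp

-- ===== VERDICT (by name: the statement is the Claim_ definition above) =====
theorem merge_rows_by_date_py_spec : Claim_equal_merge_rows_by_date_py := by
  intro existing_rows new_rows _dom _pre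
  unfold Spec_merge_rows_by_date_py merge_rows_by_date_py merge_rows_by_date_py_alt
  simp only []
  rw [← List.foldl_append]
  set L := existing_rows ++ new_rows with hL
  have hkeys : (L.foldl (fun d r => d.insert (pvRowDate r) r) PySem.Dict.empty).keys
      = PySem.Set.ofList (L.map pvRowDate) := by
    rw [PySem.Dict.keys_foldl_insert_key L pvRowDate (fun _ r => r) PySem.Dict.empty]
    simp [PySem.Set.update_nil_left]
  have hget : ∀ x, ((L.foldl (fun d r => d.insert (pvRowDate r) r) PySem.Dict.empty).get? x)
      = L.reverse.find? (fun r => pvRowDate r == x) := by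
    intro x
    rw [pv_get?_foldl_insert]
    simp
  rw [hkeys]
  rw [pv_foldl_find_eq_map (fun x => L.reverse.find? (fun r => pvRowDate r == x)) _ []
    (by
      intro x hx
      have hx' : x ∈ L.map pvRowDate := by
        have := (PySem.List.mem_sorted _ _ _ _).mp hx
        exact (PySem.Set.mem_ofList _ _).mp this
      obtain ⟨r, hrL, hrx⟩ := List.mem_map.mp hx'
      exact List.find?_isSome.mpr ⟨r, by simp [hrL], by simp [hrx]⟩)]
  simp only [List.nil_append]
  exact List.map_congr_left (fun x _ => by rw [hget x])
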